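-- pv_equiv track=rewrite | github.com/BUPT-ANTlab/HeraldLight | utils/cityflow_env.py | _get_several_segments2
-- ===== SOURCE A (Python) =====
-- def _get_several_segments2(lane_vehicles, vehicle_distance, vehicle_speed,
--                           lane_length, list_lanes):
--     # get four segments [100, 200, 300, 400] for segment
--     obs_length = 100
--     part1, part2, part3, part4 = {}, {}, {}, {}
--     for lane in list_lanes:
--         part1[lane], part2[lane], part3[lane], part4[lane] = [], [], [], []
--         for vehicle in lane_vehicles[lane]:
--             # set as num_vehicle
--             if "shadow" in vehicle:  # remove the shadow
--                 vehicle = vehicle[:-7]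
--                 continue
--             temp_v_distance = vehicle_distance[vehicle]
--             if temp_v_distance <= obs_length:
--                 part1[lane].append(vehicle)
--             elif obs_length*2>= temp_v_distance > obs_length:
--                 part2[lane].append(vehicle)
--             elif obs_length*3>= temp_v_distance > obs_length*2:
--                 part3[lane].append(vehicle)
--             elif obs_length*4>= temp_v_distance > obs_length*3:
--                 part4[lane].append(vehicle)
--
--     return part1, part2, part3, part4
-- ===== SOURCE B (Python) =====
-- def _get_several_segments2(lane_vehicles, vehicle_distance, vehicle_speed,
--                            lane_length, list_lanes):
--     # get four segments [100, 200, 300, 400] for segment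
--     def band(vs, lo, hi):
--         return [v for v in vs
--                 if "shadow" not in v and lo < vehicle_distance[v] <= hi]
--     part1, part2, part3, part4 = {}, {}, {}, {}
--     for lane in list_lanes:
--         vs = lane_vehicles[lane]
--         part1[lane] = [v for v in vs
--                        if "shadow" not in v and vehicle_distance[v] <= 100]
--         part2[lane] = band(vs, 100, 200)
--         part3[lane] = band(vs, 200, 300)
--         part4[lane] = band(vs, 300, 400)
--     return part1, part2, part3, part4
-- ===== Notes on version B (the rewrite author's own statement) =====
-- stated objective: alternative
-- what changed: A's single inner pass with a four-way elif chain appending into per-part dicts is replaced by four independent filter passes per lane: each part is built by its own list comprehension selecting one distance band, so the per-vehicle branching disappears.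
import Mathlib
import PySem

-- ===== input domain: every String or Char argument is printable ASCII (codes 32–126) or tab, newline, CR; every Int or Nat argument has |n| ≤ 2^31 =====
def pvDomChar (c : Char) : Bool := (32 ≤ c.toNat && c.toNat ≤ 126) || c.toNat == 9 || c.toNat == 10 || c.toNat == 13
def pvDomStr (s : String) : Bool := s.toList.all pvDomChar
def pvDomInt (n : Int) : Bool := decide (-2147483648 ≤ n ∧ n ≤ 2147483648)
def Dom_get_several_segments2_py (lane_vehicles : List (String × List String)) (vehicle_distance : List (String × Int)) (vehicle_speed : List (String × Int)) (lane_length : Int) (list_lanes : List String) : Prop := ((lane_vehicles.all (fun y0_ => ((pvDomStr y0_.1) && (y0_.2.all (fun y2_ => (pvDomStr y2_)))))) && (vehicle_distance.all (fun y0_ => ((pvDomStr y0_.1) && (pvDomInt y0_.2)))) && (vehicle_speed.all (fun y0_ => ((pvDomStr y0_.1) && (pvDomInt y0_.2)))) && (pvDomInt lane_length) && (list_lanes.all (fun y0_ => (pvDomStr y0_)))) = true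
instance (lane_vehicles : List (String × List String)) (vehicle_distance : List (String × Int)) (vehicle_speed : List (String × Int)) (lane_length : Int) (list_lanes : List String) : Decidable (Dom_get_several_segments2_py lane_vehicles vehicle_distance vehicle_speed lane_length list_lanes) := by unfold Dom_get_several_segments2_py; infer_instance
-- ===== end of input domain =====

-- B replaces A's single inner pass with a four-way elif chain by four independent filter passes
-- per lane, one list comprehension per distance band (alternative decomposition; same values).

-- ===== PORT A =====
-- one inner-loop iteration of A (the `for vehicle in lane_vehicles[lane]` body)
def gssA_step (vdD : PySem.Dict String Int) (obs_length : Int) (lane : String)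
    (st : PySem.Dict String (List String) × PySem.Dict String (List String) × PySem.Dict String (List String) × PySem.Dict String (List String))
    (vehicle : String) :
    PySem.Dict String (List String) × PySem.Dict String (List String) × PySem.Dict String (List String) × PySem.Dict String (List String) :=
  if PySem.Str.isIn "shadow" vehicle then
    -- vehicle = vehicle[:-7]; continue   (the reassignment is dead: the loop continues at once)
    let _vehicle := PySem.List.slice vehicle.toList none (some (-7))
    st
  else
    let temp_v_distance := vdD.getD vehicle 0   -- KeyError (missing key) excluded by Pre_
    if temp_v_distance ≤ obs_length then
      (st.1.modify lane [] (· ++ [vehicle]), st.2.1, st.2.2.1, st.2.2.2)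
    else if obs_length * 2 ≥ temp_v_distance ∧ temp_v_distance > obs_length then
      (st.1, st.2.1.modify lane [] (· ++ [vehicle]), st.2.2.1, st.2.2.2)
    else if obs_length * 3 ≥ temp_v_distance ∧ temp_v_distance > obs_length * 2 then
      (st.1, st.2.1, st.2.2.1.modify lane [] (· ++ [vehicle]), st.2.2.2)
    else if obs_length * 4 ≥ temp_v_distance ∧ temp_v_distance > obs_length * 3 then
      (st.1, st.2.1, st.2.2.1, st.2.2.2.modify lane [] (· ++ [vehicle]))
    else st

def get_several_segments2_py (lane_vehicles : List (String × List String)) (vehicle_distance : List (String × Int)) (vehicle_speed : List (String × Int)) (lane_length : Int) (list_lanes : List String) : (List (String × List String)) × (List (String × List String)) × (List (String × List String)) × (List (String × List String)) :=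
  let obs_length : Int := 100
  let lvD := PySem.Dict.mk lane_vehicles
  let vdD := PySem.Dict.mk vehicle_distance
  let st := list_lanes.foldl (fun st lane =>
      -- part1[lane], part2[lane], part3[lane], part4[lane] = [], [], [], []
      let st := (st.1.insert lane [], st.2.1.insert lane [], st.2.2.1.insert lane [], st.2.2.2.insert lane [])
      (lvD.getD lane []).foldl (gssA_step vdD obs_length lane) st)   -- KeyError on lane excluded by Pre_
    (PySem.Dict.empty, PySem.Dict.empty, PySem.Dict.empty, PySem.Dict.empty)
  (st.1.items, st.2.1.items, st.2.2.1.items, st.2.2.2.items)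

-- ===== PORT B =====
-- the helper `band(vs, lo, hi)` of Source B: one comprehension selecting one distance band
def gssB_band (vdD : PySem.Dict String Int) (vs : List String) (lo hi : Int) : List String :=
  vs.filter (fun v => !PySem.Str.isIn "shadow" v && decide (lo < vdD.getD v 0 ∧ vdD.getD v 0 ≤ hi))

-- the inline comprehension for part1 (d <= 100, no lower bound)
def gssB_first (vdD : PySem.Dict String Int) (vs : List String) : List String :=
  vs.filter (fun v => !PySem.Str.isIn "shadow" v && decide (vdD.getD v 0 ≤ 100))

def get_several_segments2_py_alt (lane_vehicles : List (String × List String)) (vehicle_distance : List (String × Int)) (vehicle_speed : List (String × Int)) (lane_length : Int) (list_lanes : List String) : (List (String × List String)) × (List (String × List String)) × (List (String × List String)) × (List (String × List String)) :=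
  let lvD := PySem.Dict.mk lane_vehicles
  let vdD := PySem.Dict.mk vehicle_distance
  let st := list_lanes.foldl (fun st lane =>
      let vs := lvD.getD lane []   -- KeyError on lane excluded by Pre_
      (st.1.insert lane (gssB_first vdD vs),
       st.2.1.insert lane (gssB_band vdD vs 100 200),
       st.2.2.1.insert lane (gssB_band vdD vs 200 300),
       st.2.2.2.insert lane (gssB_band vdD vs 300 400)))
    (PySem.Dict.empty, PySem.Dict.empty, PySem.Dict.empty, PySem.Dict.empty)
  (st.1.items, st.2.1.items, st.2.2.1.items, st.2.2.2.items)

-- ===== PRECONDITION & SPEC =====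
-- Pre_ excludes exactly the inputs on which the Python A raises KeyError: a lane of list_lanes
-- missing from lane_vehicles, or a non-shadow vehicle of such a lane missing from vehicle_distance.
def Pre_get_several_segments2_py (lane_vehicles : List (String × List String)) (vehicle_distance : List (String × Int)) (vehicle_speed : List (String × Int)) (lane_length : Int) (list_lanes : List String) : Prop :=
  ∀ lane ∈ list_lanes, (PySem.Dict.mk lane_vehicles).contains lane = true ∧
    ∀ v ∈ (PySem.Dict.mk lane_vehicles).getD lane [],
      PySem.Str.isIn "shadow" v = true ∨ (PySem.Dict.mk vehicle_distance).contains v = true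
instance (lane_vehicles : List (String × List String)) (vehicle_distance : List (String × Int)) (vehicle_speed : List (String × Int)) (lane_length : Int) (list_lanes : List String) : Decidable (Pre_get_several_segments2_py lane_vehicles vehicle_distance vehicle_speed lane_length list_lanes) := by unfold Pre_get_several_segments2_py; infer_instance

def pvWitness_get_several_segments2_py : (List (String × List String)) × (List (String × Int)) × (List (String × Int)) × Int × List String :=
  ([("L", ["a", "bshadow_0"]), ("M", [])], [("a", 150)], [], 500, ["L", "M"])

def Spec_get_several_segments2_py (lane_vehicles : List (String × List String)) (vehicle_distance : List (String × Int)) (vehicle_speed : List (String × Int)) (lane_length : Int) (list_lanes : List String) (out : (List (String × List String)) × (List (String × List String)) × (List (String × List String)) × (List (String × List String))) : Prop := out = get_several_segments2_py_alt lane_vehicles vehicle_distance vehicle_speed lane_length list_lanes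
instance (lane_vehicles : List (String × List String)) (vehicle_distance : List (String × Int)) (vehicle_speed : List (String × Int)) (lane_length : Int) (list_lanes : List String) (out : (List (String × List String)) × (List (String × List String)) × (List (String × List String)) × (List (String × List String))) : Decidable (Spec_get_several_segments2_py lane_vehicles vehicle_distance vehicle_speed lane_length list_lanes out) := by unfold Spec_get_several_segments2_py; infer_instance

-- ===== CLAIM (what is proved, stated in full; the proofs are below) =====
def Claim_equal_get_several_segments2_py : Prop := ∀ (lane_vehicles : List (String × List String)) (vehicle_distance : List (String × Int)) (vehicle_speed : List (String × Int)) (lane_length : Int) (list_lanes : List String), Dom_get_several_segments2_py lane_vehicles vehicle_distance vehicle_speed lane_length list_lanes → Pre_get_several_segments2_py lane_vehicles vehicle_distance vehicle_speed lane_length list_lanes → Spec_get_several_segments2_py lane_vehicles vehicle_distance vehicle_speed lane_length list_lanes (get_several_segments2_py lane_vehicles vehicle_distance vehicle_speed lane_length list_lanes)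

-- ===== LEMMAS AND PROOFS =====

lemma dict_insert_modify (d : PySem.Dict String (List String)) (k : String) (a L : List String) :
    (d.insert k a).modify k [] (· ++ L) = d.insert k (a ++ L) := by
  simp [PySem.Dict.modify, PySem.Dict.getD_insert_self, PySem.Dict.insert_insert_self]

lemma stepA_shadow (vdD : PySem.Dict String Int) (lane : String) (st) (v : String)
    (hs : PySem.Str.isIn "shadow" v = true) : gssA_step vdD 100 lane st v = st := by
  unfold gssA_step
  rw [if_pos hs]

lemma first_cons_shadow (vdD : PySem.Dict String Int) (v : String) (vs : List String)
    (hs : PySem.Str.isIn "shadow" v = true) : gssB_first vdD (v :: vs) = gssB_first vdD vs := by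
  have hs' : (!PySem.Str.isIn "shadow" v && decide (vdD.getD v 0 ≤ 100)) = false := by rw [hs]; rfl
  unfold gssB_first
  rw [List.filter_cons, hs']
  simp

lemma band_cons_shadow (vdD : PySem.Dict String Int) (v : String) (vs : List String) (lo hi : Int)
    (hs : PySem.Str.isIn "shadow" v = true) : gssB_band vdD (v :: vs) lo hi = gssB_band vdD vs lo hi := by
  have hs' : (!PySem.Str.isIn "shadow" v && decide (lo < vdD.getD v 0 ∧ vdD.getD v 0 ≤ hi)) = false := by
    rw [hs]; rfl
  unfold gssB_band
  rw [List.filter_cons, hs']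
  simp

lemma first_cons (vdD : PySem.Dict String Int) (v : String) (vs : List String)
    (hs : ¬ PySem.Str.isIn "shadow" v = true) :
    gssB_first vdD (v :: vs)
      = if vdD.getD v 0 ≤ 100 then v :: gssB_first vdD vs else gssB_first vdD vs := by
  simp only [gssB_first, List.filter_cons, Bool.not_eq_true] at hs ⊢
  rw [hs]
  by_cases h : vdD.getD v 0 ≤ 100
  · simp [h]
  · simp [h]

lemma band_cons (vdD : PySem.Dict String Int) (v : String) (vs : List String) (lo hi : Int)
    (hs : ¬ PySem.Str.isIn "shadow" v = true) :
    gssB_band vdD (v :: vs) lo hi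
      = if lo < vdD.getD v 0 ∧ vdD.getD v 0 ≤ hi then v :: gssB_band vdD vs lo hi else gssB_band vdD vs lo hi := by
  simp only [gssB_band, List.filter_cons, Bool.not_eq_true] at hs ⊢
  rw [hs]
  by_cases h : lo < vdD.getD v 0 ∧ vdD.getD v 0 ≤ hi
  · simp [h]
  · simp [h]

-- A's inner loop, started on freshly-inserted accumulators, produces exactly B's four filters
lemma innerA_char (vdD : PySem.Dict String Int) (lane : String) (vs : List String)
    (p1 p2 p3 p4 : PySem.Dict String (List String)) (a1 a2 a3 a4 : List String) :
    vs.foldl (gssA_step vdD 100 lane) (p1.insert lane a1, p2.insert lane a2, p3.insert lane a3, p4.insert lane a4)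
      = (p1.insert lane (a1 ++ gssB_first vdD vs), p2.insert lane (a2 ++ gssB_band vdD vs 100 200),
         p3.insert lane (a3 ++ gssB_band vdD vs 200 300), p4.insert lane (a4 ++ gssB_band vdD vs 300 400)) := by
  induction vs generalizing a1 a2 a3 a4 with
  | nil => simp [gssB_first, gssB_band]
  | cons v vs ih =>
    simp only [List.foldl_cons]
    by_cases hs : PySem.Str.isIn "shadow" v = true
    · rw [stepA_shadow vdD lane _ v hs, ih, first_cons_shadow vdD v vs hs,
        band_cons_shadow vdD v vs 100 200 hs, band_cons_shadow vdD v vs 200 300 hs,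
        band_cons_shadow vdD v vs 300 400 hs]
    · rw [first_cons vdD v vs hs, band_cons vdD v vs 100 200 hs,
        band_cons vdD v vs 200 300 hs, band_cons vdD v vs 300 400 hs]
      by_cases h1 : vdD.getD v 0 ≤ 100
      · have hstep : gssA_step vdD 100 lane (p1.insert lane a1, p2.insert lane a2, p3.insert lane a3, p4.insert lane a4) v
            = (p1.insert lane (a1 ++ [v]), p2.insert lane a2, p3.insert lane a3, p4.insert lane a4) := by
          unfold gssA_step
          rw [if_neg hs, if_pos h1, dict_insert_modify]
        rw [hstep, ih, if_pos h1, if_neg (by omega), if_neg (by omega), if_neg (by omega)]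
        simp
      · by_cases h2 : vdD.getD v 0 ≤ 200
        · have hstep : gssA_step vdD 100 lane (p1.insert lane a1, p2.insert lane a2, p3.insert lane a3, p4.insert lane a4) v
              = (p1.insert lane a1, p2.insert lane (a2 ++ [v]), p3.insert lane a3, p4.insert lane a4) := by
            unfold gssA_step
            rw [if_neg hs, if_neg h1, if_pos (by constructor <;> omega), dict_insert_modify]
          rw [hstep, ih, if_neg h1, if_pos ⟨by omega, h2⟩, if_neg (by omega), if_neg (by omega)]
          simp
        · by_cases h3 : vdD.getD v 0 ≤ 300
          · have hstep : gssA_step vdD 100 lane (p1.insert lane a1, p2.insert lane a2, p3.insert lane a3, p4.insert lane a4) v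
                = (p1.insert lane a1, p2.insert lane a2, p3.insert lane (a3 ++ [v]), p4.insert lane a4) := by
              unfold gssA_step
              rw [if_neg hs, if_neg h1, if_neg (by omega), if_pos (by constructor <;> omega), dict_insert_modify]
            rw [hstep, ih, if_neg h1, if_neg (by omega), if_pos ⟨by omega, h3⟩, if_neg (by omega)]
            simp
          · by_cases h4 : vdD.getD v 0 ≤ 400
            · have hstep : gssA_step vdD 100 lane (p1.insert lane a1, p2.insert lane a2, p3.insert lane a3, p4.insert lane a4) v
                  = (p1.insert lane a1, p2.insert lane a2, p3.insert lane a3, p4.insert lane (a4 ++ [v])) := by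
                unfold gssA_step
                rw [if_neg hs, if_neg h1, if_neg (by omega), if_neg (by omega), if_pos (by constructor <;> omega), dict_insert_modify]
              rw [hstep, ih, if_neg h1, if_neg (by omega), if_neg (by omega), if_pos ⟨by omega, h4⟩]
              simp
            · have hstep : gssA_step vdD 100 lane (p1.insert lane a1, p2.insert lane a2, p3.insert lane a3, p4.insert lane a4) v
                  = (p1.insert lane a1, p2.insert lane a2, p3.insert lane a3, p4.insert lane a4) := by
                unfold gssA_step
                rw [if_neg hs, if_neg h1, if_neg (by omega), if_neg (by omega), if_neg (by omega)]
              rw [hstep, ih, if_neg h1, if_neg (by omega), if_neg (by omega), if_neg (by omega)]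

-- ===== VERDICT (by name: the statement is the Claim_ definition above) =====
theorem get_several_segments2_py_spec : Claim_equal_get_several_segments2_py := by
  intro lane_vehicles vehicle_distance vehicle_speed lane_length list_lanes _hdom _hpre
  unfold Spec_get_several_segments2_py
  unfold get_several_segments2_py get_several_segments2_py_alt
  dsimp only
  have hfold := List.foldl_ext
    (fun (st : PySem.Dict String (List String) × PySem.Dict String (List String) × PySem.Dict String (List String) × PySem.Dict String (List String)) lane =>
      ((PySem.Dict.mk lane_vehicles).getD lane []).foldl
        (gssA_step (PySem.Dict.mk vehicle_distance) 100 lane)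
        (st.1.insert lane [], st.2.1.insert lane [], st.2.2.1.insert lane [], st.2.2.2.insert lane []))
    (fun (st : PySem.Dict String (List String) × PySem.Dict String (List String) × PySem.Dict String (List String) × PySem.Dict String (List String)) lane =>
      (st.1.insert lane (gssB_first (PySem.Dict.mk vehicle_distance) ((PySem.Dict.mk lane_vehicles).getD lane [])),
       st.2.1.insert lane (gssB_band (PySem.Dict.mk vehicle_distance) ((PySem.Dict.mk lane_vehicles).getD lane []) 100 200),
       st.2.2.1.insert lane (gssB_band (PySem.Dict.mk vehicle_distance) ((PySem.Dict.mk lane_vehicles).getD lane []) 200 300),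
       st.2.2.2.insert lane (gssB_band (PySem.Dict.mk vehicle_distance) ((PySem.Dict.mk lane_vehicles).getD lane []) 300 400)))
    (PySem.Dict.empty, PySem.Dict.empty, PySem.Dict.empty, PySem.Dict.empty)
    (l := list_lanes)
    (fun st lane _ => by
      dsimp only
      rw [innerA_char]
      simp)
  rw [hfold]
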